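-- pv_equiv track=rewrite | github.com/Kirilllord0fgalaxy/Education | t40_loudlevel.py | loudlevel
-- ===== SOURCE A (Python) =====
-- def loudlevel(loud):
--     thingsl=[['Тихая комната',40],['Будильник',70],['Газовая газонокосилка',106],['Отбойный молоток',130]]
--     for i in range(0,len(thingsl)):
--         if thingsl[i][1]==loud:return f'Уровень шума соответствует {thingsl[i][0]}'
--         elif loud>thingsl[i][1] and loud<thingsl[i+1][1]: return f'Шум больше {thingsl[i][0]},но меньше {thingsl[i+1][0]}'
--         else:
--             if loud<thingsl[0][1]:return f'Шум меньше {thingsl[0][0]}'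
--             else:return f'Шум больше {thingsl[-1][0]}'
-- ===== SOURCE B (Python) =====
-- def loudlevel(loud):
--     # A's loop always returns on its first iteration, so only the 40 and 70
--     # thresholds matter; flat if/elif chain.
--     if loud < 40:
--         return 'Шум меньше Тихая комната'
--     elif loud == 40:
--         return 'Уровень шума соответствует Тихая комната'
--     elif loud < 70:
--         return 'Шум больше Тихая комната,но меньше Будильник'
--     else:
--         return 'Шум больше Отбойный молоток'
-- ===== Notes on version B (the rewrite author's own statement) =====
-- stated objective: simpler
-- what changed: A's loop over a threshold table always returns on its first iteration, so B replaces the table and loop with a flat four-branch if/elif chain on the only two thresholds (40 and 70) that matter.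
import Mathlib
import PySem

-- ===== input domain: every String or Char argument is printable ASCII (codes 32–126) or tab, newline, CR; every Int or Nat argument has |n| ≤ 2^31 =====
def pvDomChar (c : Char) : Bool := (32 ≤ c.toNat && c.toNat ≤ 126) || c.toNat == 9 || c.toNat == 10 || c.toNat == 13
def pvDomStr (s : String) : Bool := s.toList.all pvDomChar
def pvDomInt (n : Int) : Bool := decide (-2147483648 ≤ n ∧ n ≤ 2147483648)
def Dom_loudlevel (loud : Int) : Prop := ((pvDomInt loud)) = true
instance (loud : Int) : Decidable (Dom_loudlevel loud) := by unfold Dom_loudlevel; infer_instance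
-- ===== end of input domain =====

-- B replaces A's table-and-loop (which always returns on its first iteration) with a flat if/elif chain on the two live thresholds; objective: simpler.


-- ===== PORT A =====
-- thingsl, built once in the function body
def loudlevelThings : List (String × Int) :=
  [("Тихая комната", 40), ("Будильник", 70), ("Газовая газонокосилка", 106), ("Отбойный молоток", 130)]

-- the for-loop over range(0, len(thingsl)); none = fell off the loop or IndexError (never happens)
def loudlevelLoop (loud : Int) : List Int → Option String
  | [] => none
  | i :: _rest =>
    match PySem.List.pyGet? loudlevelThings i with
    | none => none
    | some ti =>
      if ti.2 == loud then some ("Уровень шума соответствует " ++ ti.1)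
      else if loud > ti.2 then
        -- 'and' is short-circuiting: thingsl[i+1] only read when loud > thingsl[i][1]
        match PySem.List.pyGet? loudlevelThings (i + 1) with
        | none => none
        | some ti1 =>
          if loud < ti1.2 then some ("Шум больше " ++ ti.1 ++ ",но меньше " ++ ti1.1)
          else
            match PySem.List.pyGet? loudlevelThings 0, PySem.List.pyGet? loudlevelThings (-1) with
            | some t0, some tl =>
              if loud < t0.2 then some ("Шум меньше " ++ t0.1) else some ("Шум больше " ++ tl.1)
            | _, _ => none
      else
        match PySem.List.pyGet? loudlevelThings 0, PySem.List.pyGet? loudlevelThings (-1) with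
        | some t0, some tl =>
          if loud < t0.2 then some ("Шум меньше " ++ t0.1) else some ("Шум больше " ++ tl.1)
        | _, _ => none

def loudlevel (loud : Int) : String :=
  (loudlevelLoop loud (PySem.List.pyRange 0 (loudlevelThings.length : Int) 1)).getD ""

-- ===== PORT B =====
def loudlevel_alt (loud : Int) : String :=
  if loud < 40 then "Шум меньше Тихая комната"
  else if loud == 40 then "Уровень шума соответствует Тихая комната"
  else if loud < 70 then "Шум больше Тихая комната,но меньше Будильник"
  else "Шум больше Отбойный молоток"

-- ===== PRECONDITION & SPEC =====
def Spec_loudlevel (loud : Int) (out : String) : Prop := out = loudlevel_alt loud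
instance (loud : Int) (out : String) : Decidable (Spec_loudlevel loud out) := by unfold Spec_loudlevel; infer_instance

-- ===== CLAIM (what is proved, stated in full; the proofs are below) =====
def Claim_equal_loudlevel : Prop := ∀ (loud : Int), Dom_loudlevel loud → Spec_loudlevel loud (loudlevel loud)

-- ===== LEMMAS AND PROOFS =====

-- ===== VERDICT (by name: the statement is the Claim_ definition above) =====
theorem loudlevel_spec : Claim_equal_loudlevel := by
  intro loud _
  unfold Spec_loudlevel loudlevel loudlevel_alt
  rw [show PySem.List.pyRange 0 (loudlevelThings.length : Int) 1 = [0, 1, 2, 3] from by decide]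
  simp only [loudlevelLoop,
    show PySem.List.pyGet? loudlevelThings 0 = some ("Тихая комната", 40) from by decide,
    show PySem.List.pyGet? loudlevelThings (0 + 1) = some ("Будильник", 70) from by decide,
    show PySem.List.pyGet? loudlevelThings (-1) = some ("Отбойный молоток", 130) from by decide]
  rcases lt_trichotomy loud 40 with h | h | h
  · simp [h, show (40 : Int) ≠ loud from by omega, show ¬ loud > 40 from by omega]
  · simp [h]
  · rcases lt_or_ge loud 70 with h70 | h70
    · simp [show (40 : Int) ≠ loud from by omega, show loud > 40 from h, h70,
            show ¬ loud < 40 from by omega, show loud ≠ 40 from by omega]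
    · simp [show (40 : Int) ≠ loud from by omega, show loud > 40 from h,
            show ¬ loud < 70 from by omega, show ¬ loud < 40 from by omega,
            show loud ≠ 40 from by omega]
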